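-- pv_equiv track=rewrite | github.com/neelamy/Algorithm | Graph Theory/Random/TriangleEasy.py | find
-- ===== SOURCE A (Python) =====
-- def find(n,x,y):
-- 	edges ={};result=3
-- 	for i in range(len(x)):
-- 		edge1 = str(x[i]) +"-"+ str(y[i])
-- 		edge2 = str(y[i]) +"-"+ str(x[i])
-- 		#set the weight of edges as 1
-- 		edges[edge1]=1
-- 		edges[edge2]=1
--
-- 	for i in range(0,n):
-- 		for j in range(0,n):
-- 			if i==j:
-- 				continue
-- 			for k in range(0,n):
-- 				if i==k or k==j:
-- 					continue
-- 				ij= str(i) +"-"+ str(j)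
-- 				jk= str(j) +"-"+ str(k)
-- 				ki= str(k) +"-"+ str(i)
-- 				connection = edges.get(ij,0)+edges.get(jk,0)+edges.get(ki,0)
-- 				if connection ==3:
-- 					return 0
-- 				else:
-- 					result = min(3-connection , result)
-- 	return result
-- ===== SOURCE B (Python) =====
-- def find(n, x, y):
--     if n < 3:
--         return 3
--     adj = {}
--     for a, b in zip(x, y):
--         if 0 <= a < n and 0 <= b < n and a != b:
--             s = adj.get(a, set()); s.add(b); adj[a] = s
--             t = adj.get(b, set()); t.add(a); adj[b] = t
--     if any(any(not s.isdisjoint(adj[b]) for b in s) for s in adj.values()):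
--         return 0
--     if any(len(s) >= 2 for s in adj.values()):
--         return 1
--     if adj:
--         return 2
--     return 3
-- ===== Notes on version B (the rewrite author's own statement) =====
-- stated objective: faster
-- what changed: Replaces A's O(n^3) scan over all ordered vertex triples (with string-keyed edge dict) by a case analysis on an adjacency structure built from the edge list: triangle via neighbour-set intersections -> 0, some vertex with >= 2 neighbours -> 1, any in-range edge -> 2, else 3.
import Mathlib
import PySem

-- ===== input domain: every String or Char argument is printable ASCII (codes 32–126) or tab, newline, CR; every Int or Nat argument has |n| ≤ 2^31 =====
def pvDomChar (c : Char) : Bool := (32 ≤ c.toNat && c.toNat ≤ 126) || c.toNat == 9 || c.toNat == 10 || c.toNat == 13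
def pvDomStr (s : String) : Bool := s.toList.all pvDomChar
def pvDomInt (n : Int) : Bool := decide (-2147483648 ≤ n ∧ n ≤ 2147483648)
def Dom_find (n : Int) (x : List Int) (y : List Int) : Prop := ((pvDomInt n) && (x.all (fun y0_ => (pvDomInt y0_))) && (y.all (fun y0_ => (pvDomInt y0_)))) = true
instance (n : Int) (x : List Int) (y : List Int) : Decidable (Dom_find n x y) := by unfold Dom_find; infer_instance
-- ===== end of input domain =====

-- B replaces A's O(n^3) scan over all ordered vertex triples by a case analysis on an
-- adjacency structure (triangle → 0, vertex with ≥ 2 neighbours → 1, any edge → 2, else 3).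

-- ===== PORT A =====
-- Python builds string keys str(a)+"-"+str(b); strings are modelled on the List Char side
-- as the PySem convention prescribes (PySem.Int.toChars = the code points of str(a)).
def pvKey (a b : Int) : List Char := PySem.Int.toChars a ++ '-' :: PySem.Int.toChars b

-- for i in range(len(x)): edges[edge1]=1; edges[edge2]=1
-- y[i] raises IndexError when len(y) < len(x); those inputs are excluded by Pre_find,
-- inside Pre_ the pyGetD default is never used.
def pvEdges (x y : List Int) : PySem.Dict (List Char) Int :=
  (List.range x.length).foldl (fun d (i : Nat) =>
    let xi := PySem.List.pyGetD x (i : Int) 0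
    let yi := PySem.List.pyGetD y (i : Int) 0
    (d.insert (pvKey xi yi) 1).insert (pvKey yi xi) 1) PySem.Dict.empty

-- innermost 'for k in range(0,n)'; Sum.inl = early 'return 0', Sum.inr = running result
def pvKLoop (E : PySem.Dict (List Char) Int) (i j : Int) (r : Int) : List Int → Int ⊕ Int
  | [] => Sum.inr r
  | k :: ks =>
    if i = k ∨ k = j then pvKLoop E i j r ks
    else
      let conn := E.getD (pvKey i j) 0 + E.getD (pvKey j k) 0 + E.getD (pvKey k i) 0
      if conn = 3 then Sum.inl 0 else pvKLoop E i j (min (3 - conn) r) ks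

def pvJLoop (E : PySem.Dict (List Char) Int) (n i : Int) (r : Int) : List Int → Int ⊕ Int
  | [] => Sum.inr r
  | j :: js =>
    if i = j then pvJLoop E n i r js
    else
      match pvKLoop E i j r (PySem.List.pyRange 0 n 1) with
      | Sum.inl v => Sum.inl v
      | Sum.inr r' => pvJLoop E n i r' js

def pvILoop (E : PySem.Dict (List Char) Int) (n : Int) (r : Int) : List Int → Int ⊕ Int
  | [] => Sum.inr r
  | i :: is' =>
    match pvJLoop E n i r (PySem.List.pyRange 0 n 1) with
    | Sum.inl v => Sum.inl v
    | Sum.inr r' => pvILoop E n r' is'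

def find (n : Int) (x : List Int) (y : List Int) : Int :=
  let E := pvEdges x y
  match pvILoop E n 3 (PySem.List.pyRange 0 n 1) with
  | Sum.inl v => v
  | Sum.inr r => r

-- ===== PORT B =====
-- one pass over zip(x, y): s = adj.get(a, set()); s.add(b); adj[a] = s  (and symmetrically)
def pvAdjStep (n : Int) (d : PySem.Dict Int (PySem.Set Int)) (p : Int × Int) :
    PySem.Dict Int (PySem.Set Int) :=
  if 0 ≤ p.1 ∧ p.1 < n ∧ 0 ≤ p.2 ∧ p.2 < n ∧ p.1 ≠ p.2 then
    let d1 := d.insert p.1 (PySem.Set.add (d.getD p.1 PySem.Set.empty) p.2)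
    d1.insert p.2 (PySem.Set.add (d1.getD p.2 PySem.Set.empty) p.1)
  else d

def find_alt (n : Int) (x : List Int) (y : List Int) : Int :=
  if n < 3 then 3
  else
    let adj := (x.zip y).foldl (pvAdjStep n) PySem.Dict.empty
    -- adj[b] below never raises: every stored neighbour is itself a key (getD is exact here)
    if (adj.values).any (fun s =>
        s.any (fun b => ! PySem.Set.isdisjoint s (adj.getD b PySem.Set.empty))) then 0
    else if (adj.values).any (fun s => decide (2 ≤ PySem.Set.len s)) then 1
    else if adj.size ≠ 0 then 2
    else 3

-- ===== PRECONDITION & SPEC =====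
-- A indexes y[i] for every i < len(x), so it raises IndexError iff len(x) > len(y);
-- exactly those inputs are excluded.
def Pre_find (n : Int) (x : List Int) (y : List Int) : Prop := x.length ≤ y.length
instance (n : Int) (x : List Int) (y : List Int) : Decidable (Pre_find n x y) := by
  unfold Pre_find; infer_instance

def pvWitness_find : Int × List Int × List Int := (3, [0, 1], [1, 2])

def Spec_find (n : Int) (x : List Int) (y : List Int) (out : Int) : Prop := out = find_alt n x y
instance (n : Int) (x : List Int) (y : List Int) (out : Int) : Decidable (Spec_find n x y out) := by
  unfold Spec_find; infer_instance

-- ===== CLAIM (what is proved, stated in full; the proofs are below) =====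
def Claim_equal_find : Prop := ∀ (n : Int) (x : List Int) (y : List Int),
  Dom_find n x y → Pre_find n x y → Spec_find n x y (find n x y)

-- ===== LEMMAS AND PROOFS =====

-- ---- the common graph vocabulary ----
abbrev HasPair (x y : List Int) (a b : Int) : Prop :=
  ∃ p ∈ x.zip y, (p.1 = a ∧ p.2 = b) ∨ (p.1 = b ∧ p.2 = a)

def AdjP (n : Int) (x y : List Int) (a b : Int) : Prop :=
  0 ≤ a ∧ a < n ∧ 0 ≤ b ∧ b < n ∧ a ≠ b ∧ HasPair x y a b

def TriP (n : Int) (x y : List Int) : Prop :=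
  ∃ a b c, AdjP n x y a b ∧ AdjP n x y b c ∧ AdjP n x y a c

def PathP (n : Int) (x y : List Int) : Prop :=
  ∃ v b c, b ≠ c ∧ AdjP n x y v b ∧ AdjP n x y v c

def EdgeP (n : Int) (x y : List Int) : Prop := ∃ a b, AdjP n x y a b

lemma hasPair_symm {x y : List Int} {a b : Int} (h : HasPair x y a b) : HasPair x y b a := by
  obtain ⟨p, hp, h⟩ := h; exact ⟨p, hp, h.symm⟩

lemma adjP_symm {n : Int} {x y : List Int} {a b : Int} (h : AdjP n x y a b) : AdjP n x y b a := by
  obtain ⟨h1, h2, h3, h4, h5, h6⟩ := h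
  exact ⟨h3, h4, h1, h2, fun e => h5 e.symm, hasPair_symm h6⟩

-- ---- key injectivity ----
lemma pvDigitChar_inj : ∀ a < 10, ∀ b < 10, Nat.digitChar a = Nat.digitChar b → a = b := by decide

lemma pvToDigits10_inj : ∀ a b : Nat, Nat.toDigits 10 a = Nat.toDigits 10 b → a = b := by
  intro a
  induction a using Nat.strong_induction_on with
  | _ a ih =>
    intro b h
    rw [Nat.toDigits_eq_if (by norm_num)] at h
    rw [Nat.toDigits_eq_if (n := b) (by norm_num)] at h
    split_ifs at h with h1 h2 h2
    · exact pvDigitChar_inj a h1 b h2 (by simpa using h)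
    · exfalso
      have hlen := congrArg List.length h
      simp only [List.length_append, List.length_singleton] at hlen
      have hpos := @Nat.length_toDigits_pos 10 (b / 10)
      omega
    · exfalso
      have hlen := congrArg List.length h
      simp only [List.length_append, List.length_singleton] at hlen
      have hpos := @Nat.length_toDigits_pos 10 (a / 10)
      omega
    · rw [← List.concat_eq_append, ← List.concat_eq_append, List.concat_inj] at h
      obtain ⟨h3, h4⟩ := h
      have hd : a / 10 = b / 10 := ih (a / 10) (by omega) _ h3
      have hm : a % 10 = b % 10 :=
        pvDigitChar_inj _ (Nat.mod_lt _ (by norm_num)) _ (Nat.mod_lt _ (by norm_num)) h4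
      omega

lemma pvToDigits_head (m : Nat) : ∃ c t, Nat.toDigits 10 m = c :: t ∧ c.isDigit := by
  rcases hl : Nat.toDigits 10 m with _ | ⟨c, t⟩
  · exfalso; have := @Nat.length_toDigits_pos 10 m; rw [hl] at this; simp at this
  · refine ⟨c, t, rfl, Nat.isDigit_of_mem_toDigits (b := 10) (n := m) (by norm_num) (by norm_num) ?_⟩
    rw [hl]; exact List.mem_cons_self ..

lemma pvToChars_nonneg {a : Int} (h : 0 ≤ a) :
    PySem.Int.toChars a = Nat.toDigits 10 a.toNat := by
  simp [PySem.Int.toChars, not_lt.mpr h]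

lemma pvToChars_neg {a : Int} (h : a < 0) :
    PySem.Int.toChars a = '-' :: Nat.toDigits 10 a.natAbs := by
  simp [PySem.Int.toChars, h]

lemma pvDashNotDigit : ('-' : Char).isDigit = false := by decide

lemma pvToChars_inj {a b : Int} (h : PySem.Int.toChars a = PySem.Int.toChars b) : a = b := by
  rcases lt_or_ge a 0 with ha | ha <;> rcases lt_or_ge b 0 with hb | hb
  · rw [pvToChars_neg ha, pvToChars_neg hb] at h
    simp only [List.cons.injEq, true_and] at h
    have := pvToDigits10_inj _ _ h
    omega
  · rw [pvToChars_neg ha, pvToChars_nonneg hb] at h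
    obtain ⟨c, t, hct, hc⟩ := pvToDigits_head b.toNat
    rw [hct] at h
    simp only [List.cons.injEq] at h
    rw [← h.1] at hc
    simp [pvDashNotDigit] at hc
  · rw [pvToChars_nonneg ha, pvToChars_neg hb] at h
    obtain ⟨c, t, hct, hc⟩ := pvToDigits_head a.toNat
    rw [hct] at h
    simp only [List.cons.injEq] at h
    rw [h.1] at hc
    simp [pvDashNotDigit] at hc
  · rw [pvToChars_nonneg ha, pvToChars_nonneg hb] at h
    have := pvToDigits10_inj _ _ h
    omega

lemma pvSplitKey : ∀ (d1 : List Char) (r1 : List Char) (d2 r2 : List Char),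
    (∀ c ∈ d1, c.isDigit) → (∀ c ∈ d2, c.isDigit) →
    d1 ++ '-' :: r1 = d2 ++ '-' :: r2 → d1 = d2 ∧ r1 = r2 := by
  intro d1
  induction d1 with
  | nil =>
    intro r1 d2 r2 _ hd2 h
    cases d2 with
    | nil => simpa using h
    | cons c t =>
      exfalso
      simp only [List.nil_append, List.cons_append, List.cons.injEq] at h
      have := hd2 c (List.mem_cons_self ..)
      rw [← h.1] at this
      simp [pvDashNotDigit] at this
  | cons c t ih =>
    intro r1 d2 r2 hd1 hd2 h
    cases d2 with
    | nil =>
      exfalso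
      simp only [List.nil_append, List.cons_append, List.cons.injEq] at h
      have := hd1 c (List.mem_cons_self ..)
      rw [h.1] at this
      simp [pvDashNotDigit] at this
    | cons c' t' =>
      simp only [List.cons_append, List.cons.injEq] at h
      obtain ⟨h1, h2⟩ := h
      obtain ⟨h3, h4⟩ := ih r1 t' r2 (fun d hd => hd1 d (List.mem_cons_of_mem _ hd))
        (fun d hd => hd2 d (List.mem_cons_of_mem _ hd)) h2
      exact ⟨by simp [h1, h3], h4⟩

lemma pvKey_inj {i j a b : Int} (hi : 0 ≤ i) (hj : 0 ≤ j) :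
    pvKey a b = pvKey i j ↔ a = i ∧ b = j := by
  constructor
  · intro h
    unfold pvKey at h
    rcases lt_or_ge a 0 with ha | ha
    · exfalso
      rw [pvToChars_neg ha, pvToChars_nonneg hi] at h
      obtain ⟨c, t, hct, hc⟩ := pvToDigits_head i.toNat
      rw [hct] at h
      simp only [List.cons_append, List.cons.injEq] at h
      rw [← h.1] at hc
      simp [pvDashNotDigit] at hc
    · rw [pvToChars_nonneg ha, pvToChars_nonneg hi] at h
      obtain ⟨h1, h2⟩ := pvSplitKey _ _ _ _
        (fun c hc => Nat.isDigit_of_mem_toDigits (b := 10) (n := a.toNat) (by norm_num) (by norm_num) hc)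
        (fun c hc => Nat.isDigit_of_mem_toDigits (b := 10) (n := i.toNat) (by norm_num) (by norm_num) hc) h
      have hai : a = i := by have := pvToDigits10_inj _ _ h1; omega
      exact ⟨hai, pvToChars_inj h2⟩
  · rintro ⟨rfl, rfl⟩; rfl

-- ---- semantics of A's edge dict ----
lemma pvGetD_foldlKey (l : List (Int × Int)) (d : PySem.Dict (List Char) Int) (k : List Char) :
    (l.foldl (fun d p => (d.insert (pvKey p.1 p.2) 1).insert (pvKey p.2 p.1) 1) d).getD k 0
      = if (∃ p ∈ l, pvKey p.1 p.2 = k ∨ pvKey p.2 p.1 = k) then 1 else d.getD k 0 := by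
  induction l generalizing d with
  | nil => simp
  | cons p l ih =>
    simp only [List.foldl_cons]
    rw [ih, PySem.Dict.getD_insert, PySem.Dict.getD_insert]
    by_cases hl : ∃ q ∈ l, pvKey q.1 q.2 = k ∨ pvKey q.2 q.1 = k
    · simp [hl]
    · by_cases h1 : k = pvKey p.1 p.2 <;> by_cases h2 : k = pvKey p.2 p.1 <;>
        simp [hl, h1, h2] <;> tauto

lemma pvFoldl_range_getD {β : Type} (G : β → Int × Int → β) :
    ∀ (x y : List Int), x.length ≤ y.length → ∀ (d : β),
    (List.range x.length).foldl (fun d i => G d (x.getD i 0, y.getD i 0)) d = (x.zip y).foldl G d := by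
  intro x
  induction x with
  | nil => intro y h d; simp
  | cons a x ih =>
    intro y h d
    cases y with
    | nil => simp at h
    | cons c y =>
      simp only [List.length_cons, List.range_succ_eq_map, List.foldl_cons, List.foldl_map,
        List.zip_cons_cons, List.getD_cons_zero]
      have hstep : ∀ (d' : β),
          (List.range x.length).foldl
            (fun d i => G d ((a :: x).getD i.succ 0, (c :: y).getD i.succ 0)) d'
          = (x.zip y).foldl G d' := by
        intro d'
        rw [← ih y (by simpa using h) d']
        apply PySem.List.foldl_congr_mem
        intro acc i _
        simp [List.getD_cons_succ]
      exact hstep (G d (a, c))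

lemma pvEdges_eq_zip (x y : List Int) (h : x.length ≤ y.length) :
    pvEdges x y = (x.zip y).foldl
      (fun d p => (d.insert (pvKey p.1 p.2) 1).insert (pvKey p.2 p.1) 1) PySem.Dict.empty := by
  unfold pvEdges
  simp only [PySem.List.pyGetD_natCast]
  exact pvFoldl_range_getD (fun (d : PySem.Dict (List Char) Int) p => (d.insert (pvKey p.1 p.2) 1).insert (pvKey p.2 p.1) 1) x y h _

def ebI (x y : List Int) (a b : Int) : Int := (pvEdges x y).getD (pvKey a b) 0

lemma ebI_eq {x y : List Int} (h : x.length ≤ y.length) {a b : Int} (ha : 0 ≤ a) (hb : 0 ≤ b) :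
    ebI x y a b = if HasPair x y a b then 1 else 0 := by
  unfold ebI
  rw [pvEdges_eq_zip x y h, pvGetD_foldlKey]
  rw [PySem.Dict.getD_empty]
  have hiff : (∃ p ∈ x.zip y, pvKey p.1 p.2 = pvKey a b ∨ pvKey p.2 p.1 = pvKey a b)
      ↔ HasPair x y a b := by
    constructor
    · rintro ⟨p, hp, hk | hk⟩
      · rw [pvKey_inj ha hb] at hk; exact ⟨p, hp, Or.inl hk⟩
      · rw [pvKey_inj ha hb] at hk; exact ⟨p, hp, Or.inr ⟨hk.2, hk.1⟩⟩
    · rintro ⟨p, hp, ⟨h1, h2⟩ | ⟨h1, h2⟩⟩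
      · exact ⟨p, hp, Or.inl (by rw [h1, h2])⟩
      · exact ⟨p, hp, Or.inr (by rw [h1, h2])⟩
  simp only [hiff]

lemma ebI_bounds {x y : List Int} (h : x.length ≤ y.length) {a b : Int} (ha : 0 ≤ a) (hb : 0 ≤ b) :
    0 ≤ ebI x y a b ∧ ebI x y a b ≤ 1 := by
  rw [ebI_eq h ha hb]; split <;> omega

lemma ebI_one {x y : List Int} (h : x.length ≤ y.length) {a b : Int} (ha : 0 ≤ a) (hb : 0 ≤ b)
    (h1 : ebI x y a b = 1) : HasPair x y a b := by
  rw [ebI_eq h ha hb] at h1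
  by_contra hc; simp [hc] at h1

lemma ebI_of_hasPair {x y : List Int} (h : x.length ≤ y.length) {a b : Int} (ha : 0 ≤ a)
    (hb : 0 ≤ b) (hp : HasPair x y a b) : ebI x y a b = 1 := by
  rw [ebI_eq h ha hb, if_pos hp]

def connI (x y : List Int) (i j k : Int) : Int := ebI x y i j + ebI x y j k + ebI x y k i

-- ---- A's loops as folds ----
def kfold (x y : List Int) (i j : Int) (r : Int) (ks : List Int) : Int :=
  ks.foldl (fun r k => if i = k ∨ k = j then r else min (3 - connI x y i j k) r) r

def jfold (n : Int) (x y : List Int) (i : Int) (r : Int) (js : List Int) : Int :=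
  js.foldl (fun r j => if i = j then r else kfold x y i j r (PySem.List.pyRange 0 n 1)) r

def ifold (n : Int) (x y : List Int) (r : Int) (is' : List Int) : Int :=
  is'.foldl (fun r i => jfold n x y i r (PySem.List.pyRange 0 n 1)) r

abbrev ktri (x y : List Int) (i j : Int) (ks : List Int) : Prop :=
  ∃ k ∈ ks, ¬(i = k ∨ k = j) ∧ connI x y i j k = 3

abbrev jtri (n : Int) (x y : List Int) (i : Int) (js : List Int) : Prop :=
  ∃ j ∈ js, i ≠ j ∧ ktri x y i j (PySem.List.pyRange 0 n 1)

abbrev itri (n : Int) (x y : List Int) (is' : List Int) : Prop :=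
  ∃ i ∈ is', jtri n x y i (PySem.List.pyRange 0 n 1)

lemma pvExists_cons_iff {α : Type} {P : α → Prop} {a : α} {l : List α} (ha : ¬ P a) :
    (∃ b ∈ a :: l, P b) ↔ (∃ b ∈ l, P b) := by
  constructor
  · rintro ⟨b, hb, hP⟩
    rcases List.mem_cons.mp hb with rfl | hb
    · exact absurd hP ha
    · exact ⟨b, hb, hP⟩
  · rintro ⟨b, hb, hP⟩; exact ⟨b, List.mem_cons_of_mem _ hb, hP⟩

lemma pvKLoop_spec (x y : List Int) (i j : Int) : ∀ (ks : List Int) (r : Int),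
    pvKLoop (pvEdges x y) i j r ks
      = if ktri x y i j ks then Sum.inl 0 else Sum.inr (kfold x y i j r ks) := by
  intro ks
  induction ks with
  | nil => intro r; simp [pvKLoop, kfold]
  | cons k ks ih =>
    intro r
    by_cases hc : i = k ∨ k = j
    · rw [pvKLoop, if_pos hc, ih,
        if_congr (pvExists_cons_iff (fun h => h.1 hc)) rfl rfl]
      unfold kfold
      rw [List.foldl_cons, if_pos hc]
    · have hconn : (pvEdges x y).getD (pvKey i j) 0 + (pvEdges x y).getD (pvKey j k) 0
          + (pvEdges x y).getD (pvKey k i) 0 = connI x y i j k := rfl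
      rw [pvKLoop, if_neg hc]
      simp only [hconn]
      by_cases h3 : connI x y i j k = 3
      · rw [if_pos h3, if_pos ⟨k, List.mem_cons_self .., hc, h3⟩]
      · rw [if_neg h3, ih,
          if_congr (pvExists_cons_iff (fun h => h3 h.2)) rfl rfl]
        unfold kfold
        rw [List.foldl_cons, if_neg hc]

lemma pvJLoop_spec (n : Int) (x y : List Int) (i : Int) : ∀ (js : List Int) (r : Int),
    pvJLoop (pvEdges x y) n i r js
      = if jtri n x y i js then Sum.inl 0 else Sum.inr (jfold n x y i r js) := by
  intro js
  induction js with
  | nil => intro r; simp [pvJLoop, jfold]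
  | cons j js ih =>
    intro r
    by_cases hc : i = j
    · rw [pvJLoop, if_pos hc, ih,
        if_congr (pvExists_cons_iff (fun h => h.1 hc)) rfl rfl]
      unfold jfold
      rw [List.foldl_cons, if_pos hc]
    · rw [pvJLoop, if_neg hc, pvKLoop_spec]
      by_cases hk : ktri x y i j (PySem.List.pyRange 0 n 1)
      · rw [if_pos hk, if_pos ⟨j, List.mem_cons_self .., hc, hk⟩]
      · rw [if_neg hk]
        show pvJLoop (pvEdges x y) n i (kfold x y i j r (PySem.List.pyRange 0 n 1)) js
          = if jtri n x y i (j :: js) then Sum.inl 0 else Sum.inr (jfold n x y i r (j :: js))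
        rw [ih, if_congr (pvExists_cons_iff (fun h => hk h.2)) rfl rfl]
        unfold jfold
        rw [List.foldl_cons, if_neg hc]

lemma pvILoop_spec (n : Int) (x y : List Int) : ∀ (is' : List Int) (r : Int),
    pvILoop (pvEdges x y) n r is'
      = if itri n x y is' then Sum.inl 0 else Sum.inr (ifold n x y r is') := by
  intro is'
  induction is' with
  | nil => intro r; simp [pvILoop, ifold]
  | cons i is' ih =>
    intro r
    rw [pvILoop, pvJLoop_spec]
    by_cases hj : jtri n x y i (PySem.List.pyRange 0 n 1)
    · rw [if_pos hj, if_pos ⟨i, List.mem_cons_self .., hj⟩]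
    · rw [if_neg hj]
      show pvILoop (pvEdges x y) n (jfold n x y i r (PySem.List.pyRange 0 n 1)) is'
        = if itri n x y (i :: is') then Sum.inl 0 else Sum.inr (ifold n x y r (i :: is'))
      rw [ih, if_congr (pvExists_cons_iff
        (P := fun v => jtri n x y v (PySem.List.pyRange 0 n 1)) (a := i) hj) rfl rfl]
      unfold ifold
      rw [List.foldl_cons]

lemma find_eq (n : Int) (x y : List Int) :
    find n x y = if itri n x y (PySem.List.pyRange 0 n 1) then 0
                 else ifold n x y 3 (PySem.List.pyRange 0 n 1) := by
  show (match pvILoop (pvEdges x y) n 3 (PySem.List.pyRange 0 n 1) with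
    | Sum.inl v => v | Sum.inr r => r) = _
  rw [pvILoop_spec]
  by_cases h : itri n x y (PySem.List.pyRange 0 n 1) <;> simp [h]

-- ---- generic fold-min machinery ----
lemma pvFoldl_le_init {α : Type} {f : Int → α → Int} (h : ∀ r a, f r a ≤ r) :
    ∀ (l : List α) (r : Int), l.foldl f r ≤ r := by
  intro l
  induction l with
  | nil => intro r; simp
  | cons a l ih => intro r; exact le_trans (ih (f r a)) (h r a)

lemma pvFoldl_mono {α : Type} {f : Int → α → Int}
    (h : ∀ a r r', r ≤ r' → f r a ≤ f r' a) :
    ∀ (l : List α) (r r' : Int), r ≤ r' → l.foldl f r ≤ l.foldl f r' := by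
  intro l
  induction l with
  | nil => intro r r' hr; simpa using hr
  | cons a l ih => intro r r' hr; exact ih _ _ (h a r r' hr)

lemma pvFoldl_le_elem {α : Type} {f : Int → α → Int}
    (hdec : ∀ r a, f r a ≤ r) (hmono : ∀ a r r', r ≤ r' → f r a ≤ f r' a)
    {a : α} {l : List α} (hmem : a ∈ l) (r : Int) : l.foldl f r ≤ f r a := by
  obtain ⟨s, t, rfl⟩ := List.append_of_mem hmem
  rw [List.foldl_append, List.foldl_cons]
  refine le_trans (pvFoldl_le_init hdec t _) ?_
  exact hmono a _ r (pvFoldl_le_init hdec s r)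

lemma pvFoldl_ge {α : Type} {f : Int → α → Int} {c : Int} :
    ∀ (l : List α) (r : Int), (∀ r' a, a ∈ l → c ≤ r' → c ≤ f r' a) → c ≤ r → c ≤ l.foldl f r := by
  intro l
  induction l with
  | nil => intro r _ hr; simpa using hr
  | cons a l ih =>
    intro r h hr
    exact ih (f r a) (fun r' b hb => h r' b (List.mem_cons_of_mem _ hb))
      (h r a (List.mem_cons_self ..) hr)

-- ---- A-side characterization ----
lemma pvTriple_n3 {n i j k : Int} (hi : i ∈ PySem.List.pyRange 0 n 1)
    (hj : j ∈ PySem.List.pyRange 0 n 1) (hk : k ∈ PySem.List.pyRange 0 n 1)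
    (hij : i ≠ j) (hik : i ≠ k) (hkj : k ≠ j) : 3 ≤ n := by
  rw [PySem.List.mem_pyRange_one] at hi hj hk
  omega

lemma pvTriP_of_itri {n : Int} {x y : List Int} (h : x.length ≤ y.length)
    (ht : itri n x y (PySem.List.pyRange 0 n 1)) : TriP n x y := by
  obtain ⟨i, hi, j, hj, hij, k, hk, hnc, h3⟩ := ht
  rw [PySem.List.mem_pyRange_one] at hi hj hk
  push_neg at hnc
  obtain ⟨hik, hkj⟩ := hnc
  have b1 := ebI_bounds h (a := i) (b := j) (by omega) (by omega)
  have b2 := ebI_bounds h (a := j) (b := k) (by omega) (by omega)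
  have b3 := ebI_bounds h (a := k) (b := i) (by omega) (by omega)
  unfold connI at h3
  have e1 : ebI x y i j = 1 := by omega
  have e2 : ebI x y j k = 1 := by omega
  have e3 : ebI x y k i = 1 := by omega
  have p1 := ebI_one h (by omega) (by omega) e1
  have p2 := ebI_one h (by omega) (by omega) e2
  have p3 := ebI_one h (by omega) (by omega) e3
  exact ⟨i, j, k, ⟨hi.1, hi.2, hj.1, hj.2, hij, p1⟩,
    ⟨hj.1, hj.2, hk.1, hk.2, fun e => hkj e.symm, p2⟩,
    ⟨hi.1, hi.2, hk.1, hk.2, fun e => hik e, hasPair_symm p3⟩⟩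

lemma pvItri_of_triP {n : Int} {x y : List Int} (h : x.length ≤ y.length)
    (ht : TriP n x y) : itri n x y (PySem.List.pyRange 0 n 1) := by
  obtain ⟨a, b, c, hab, hbc, hac⟩ := ht
  obtain ⟨ha0, han, hb0, hbn, hne1, hp1⟩ := hab
  obtain ⟨_, _, hc0, hcn, hne2, hp2⟩ := hbc
  obtain ⟨_, _, _, _, hne3, hp3⟩ := hac
  refine ⟨a, PySem.List.mem_pyRange_one.mpr ⟨ha0, han⟩,
    b, PySem.List.mem_pyRange_one.mpr ⟨hb0, hbn⟩, hne1,
    c, PySem.List.mem_pyRange_one.mpr ⟨hc0, hcn⟩,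
    by push_neg; exact ⟨hne3, fun e => hne2 e.symm⟩, ?_⟩
  unfold connI
  rw [ebI_of_hasPair h ha0 hb0 hp1, ebI_of_hasPair h hb0 hc0 hp2,
    ebI_of_hasPair h hc0 ha0 (hasPair_symm hp3)]
  norm_num

lemma pvIfold_le_triple (n : Int) (x y : List Int) {i j k : Int}
    (hi : i ∈ PySem.List.pyRange 0 n 1) (hj : j ∈ PySem.List.pyRange 0 n 1)
    (hk : k ∈ PySem.List.pyRange 0 n 1) (hij : i ≠ j) (hnc : ¬(i = k ∨ k = j)) (r : Int) :
    ifold n x y r (PySem.List.pyRange 0 n 1) ≤ 3 - connI x y i j k := by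
  have hkdec : ∀ (i' j' : Int) (r : Int) (k' : Int),
      (if i' = k' ∨ k' = j' then r else min (3 - connI x y i' j' k') r) ≤ r := by
    intro i' j' r k'; split
    · exact le_refl r
    · exact min_le_right _ _
  have hkmono : ∀ (i' j' : Int) (k' : Int) (r r' : Int), r ≤ r' →
      (if i' = k' ∨ k' = j' then r else min (3 - connI x y i' j' k') r)
        ≤ (if i' = k' ∨ k' = j' then r' else min (3 - connI x y i' j' k') r') := by
    intro i' j' k' r r' hr; split
    · exact hr
    · exact min_le_min (le_refl _) hr
  have hjdec : ∀ (i' : Int) (r : Int) (j' : Int),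
      (if i' = j' then r else kfold x y i' j' r (PySem.List.pyRange 0 n 1)) ≤ r := by
    intro i' r j'; split
    · exact le_refl r
    · exact pvFoldl_le_init (hkdec i' j') _ r
  have hjmono : ∀ (i' : Int) (j' : Int) (r r' : Int), r ≤ r' →
      (if i' = j' then r else kfold x y i' j' r (PySem.List.pyRange 0 n 1))
        ≤ (if i' = j' then r' else kfold x y i' j' r' (PySem.List.pyRange 0 n 1)) := by
    intro i' j' r r' hr; split
    · exact hr
    · exact pvFoldl_mono (hkmono i' j') _ _ _ hr
  have hidec : ∀ (r : Int) (i' : Int), jfold n x y i' r (PySem.List.pyRange 0 n 1) ≤ r := by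
    intro r i'
    exact pvFoldl_le_init (fun r j' => hjdec i' r j') _ r
  have himono : ∀ (i' : Int) (r r' : Int), r ≤ r' →
      jfold n x y i' r (PySem.List.pyRange 0 n 1) ≤ jfold n x y i' r' (PySem.List.pyRange 0 n 1) := by
    intro i' r r' hr
    exact pvFoldl_mono (fun j' r r' hr => hjmono i' j' r r' hr) _ _ _ hr
  have h1 : ifold n x y r (PySem.List.pyRange 0 n 1) ≤ jfold n x y i r (PySem.List.pyRange 0 n 1) :=
    pvFoldl_le_elem (f := fun r i' => jfold n x y i' r (PySem.List.pyRange 0 n 1))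
      (fun r i' => hidec r i') (fun i' r r' hr => himono i' r r' hr) hi r
  have h2 : jfold n x y i r (PySem.List.pyRange 0 n 1) ≤ kfold x y i j r (PySem.List.pyRange 0 n 1) := by
    have := pvFoldl_le_elem (f := fun r j' => if i = j' then r else kfold x y i j' r (PySem.List.pyRange 0 n 1))
      (fun r j' => hjdec i r j') (fun j' r r' hr => hjmono i j' r r' hr) (a := j) hj r
    rw [if_neg hij] at this
    exact this
  have h3 : kfold x y i j r (PySem.List.pyRange 0 n 1) ≤ 3 - connI x y i j k := by
    have := pvFoldl_le_elem (f := fun r k' => if i = k' ∨ k' = j then r else min (3 - connI x y i j k') r)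
      (fun r k' => hkdec i j r k') (fun k' r r' hr => hkmono i j k' r r' hr) hk r
    rw [if_neg hnc] at this
    exact le_trans this (min_le_left _ _)
  exact le_trans h1 (le_trans h2 h3)

lemma pvIfold_ge (n : Int) (x y : List Int) {c r : Int} (hcr : c ≤ r)
    (h : ∀ i j k : Int, i ∈ PySem.List.pyRange 0 n 1 → j ∈ PySem.List.pyRange 0 n 1 →
      k ∈ PySem.List.pyRange 0 n 1 → i ≠ j → ¬(i = k ∨ k = j) → c ≤ 3 - connI x y i j k) :
    c ≤ ifold n x y r (PySem.List.pyRange 0 n 1) := by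
  apply pvFoldl_ge _ _ _ hcr
  intro r1 i hi hr1
  apply pvFoldl_ge _ _ _ hr1
  intro r2 j hj hr2
  split
  · exact hr2
  · rename_i hij
    apply pvFoldl_ge _ _ _ hr2
    intro r3 k hk hr3
    split
    · exact hr3
    · rename_i hnc
      exact le_min (h i j k hi hj hk hij hnc) hr3

lemma pvConn_le_two_noTri {n : Int} {x y : List Int} (h : x.length ≤ y.length)
    (hT : ¬ TriP n x y) {i j k : Int} (hi : i ∈ PySem.List.pyRange 0 n 1)
    (hj : j ∈ PySem.List.pyRange 0 n 1) (hk : k ∈ PySem.List.pyRange 0 n 1)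
    (hij : i ≠ j) (hnc : ¬(i = k ∨ k = j)) : connI x y i j k ≤ 2 := by
  rw [PySem.List.mem_pyRange_one] at hi hj hk
  push_neg at hnc
  obtain ⟨hik, hkj⟩ := hnc
  have b1 := ebI_bounds h (a := i) (b := j) (by omega) (by omega)
  have b2 := ebI_bounds h (a := j) (b := k) (by omega) (by omega)
  have b3 := ebI_bounds h (a := k) (b := i) (by omega) (by omega)
  unfold connI
  by_contra hc
  have e1 : ebI x y i j = 1 := by omega
  have e2 : ebI x y j k = 1 := by omega
  have e3 : ebI x y k i = 1 := by omega
  exact hT ⟨i, j, k, ⟨by omega, by omega, by omega, by omega, hij, ebI_one h (by omega) (by omega) e1⟩,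
    ⟨by omega, by omega, by omega, by omega, fun e => hkj e.symm, ebI_one h (by omega) (by omega) e2⟩,
    ⟨by omega, by omega, by omega, by omega, hik, hasPair_symm (ebI_one h (by omega) (by omega) e3)⟩⟩

lemma pvConn_le_two {n : Int} {x y : List Int} (h : x.length ≤ y.length) (hT : ¬ TriP n x y)
    (hP : ¬ PathP n x y) {i j k : Int} (hi : i ∈ PySem.List.pyRange 0 n 1)
    (hj : j ∈ PySem.List.pyRange 0 n 1) (hk : k ∈ PySem.List.pyRange 0 n 1)
    (hij : i ≠ j) (hnc : ¬(i = k ∨ k = j)) : connI x y i j k ≤ 1 := by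
  rw [PySem.List.mem_pyRange_one] at hi hj hk
  push_neg at hnc
  obtain ⟨hik, hkj⟩ := hnc
  have b1 := ebI_bounds h (a := i) (b := j) (by omega) (by omega)
  have b2 := ebI_bounds h (a := j) (b := k) (by omega) (by omega)
  have b3 := ebI_bounds h (a := k) (b := i) (by omega) (by omega)
  unfold connI
  by_contra hc
  have h2 : (ebI x y i j = 1 ∧ ebI x y j k = 1) ∨ (ebI x y j k = 1 ∧ ebI x y k i = 1)
      ∨ (ebI x y i j = 1 ∧ ebI x y k i = 1) := by omega
  have mkAdj : ∀ a b : Int, 0 ≤ a → a < n → 0 ≤ b → b < n → a ≠ b →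
      ebI x y a b = 1 → AdjP n x y a b := by
    intro a b ha0 han hb0 hbn hne he
    exact ⟨ha0, han, hb0, hbn, hne, ebI_one h ha0 hb0 he⟩
  rcases h2 with ⟨e1, e2⟩ | ⟨e2, e3⟩ | ⟨e1, e3⟩
  · exact hP ⟨j, i, k, hik, adjP_symm (mkAdj i j hi.1 hi.2 hj.1 hj.2 hij e1),
      mkAdj j k hj.1 hj.2 hk.1 hk.2 (fun e => hkj e.symm) e2⟩
  · exact hP ⟨k, j, i, fun e => hij e.symm,
      adjP_symm (mkAdj j k hj.1 hj.2 hk.1 hk.2 (fun e => hkj e.symm) e2),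
      mkAdj k i hk.1 hk.2 hi.1 hi.2 (fun e => hik e.symm) e3⟩
  · exact hP ⟨i, j, k, fun e => hkj e.symm,
      mkAdj i j hi.1 hi.2 hj.1 hj.2 hij e1,
      adjP_symm (mkAdj k i hk.1 hk.2 hi.1 hi.2 (fun e => hik e.symm) e3)⟩

lemma pvConn_eq_zero {n : Int} {x y : List Int} (h : x.length ≤ y.length)
    (hE : ¬ (EdgeP n x y ∧ 3 ≤ n)) {i j k : Int} (hi : i ∈ PySem.List.pyRange 0 n 1)
    (hj : j ∈ PySem.List.pyRange 0 n 1) (hk : k ∈ PySem.List.pyRange 0 n 1)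
    (hij : i ≠ j) (hnc : ¬(i = k ∨ k = j)) : connI x y i j k = 0 := by
  have hn3 : 3 ≤ n := pvTriple_n3 hi hj hk hij (fun e => hnc (Or.inl e)) (fun e => hnc (Or.inr e))
  rw [PySem.List.mem_pyRange_one] at hi hj hk
  push_neg at hnc
  obtain ⟨hik, hkj⟩ := hnc
  have b1 := ebI_bounds h (a := i) (b := j) (by omega) (by omega)
  have b2 := ebI_bounds h (a := j) (b := k) (by omega) (by omega)
  have b3 := ebI_bounds h (a := k) (b := i) (by omega) (by omega)
  have hne : ¬ EdgeP n x y := fun he => hE ⟨he, hn3⟩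
  have z : ∀ a b : Int, 0 ≤ a → a < n → 0 ≤ b → b < n → a ≠ b → ebI x y a b = 0 := by
    intro a b ha0 han hb0 hbn hne'
    by_contra hz
    have hb := ebI_bounds h ha0 hb0
    have : ebI x y a b = 1 := by omega
    exact hne ⟨a, b, ha0, han, hb0, hbn, hne', ebI_one h ha0 hb0 this⟩
  unfold connI
  rw [z i j (by omega) (by omega) (by omega) (by omega) hij,
    z j k (by omega) (by omega) (by omega) (by omega) (fun e => hkj e.symm),
    z k i (by omega) (by omega) (by omega) (by omega) (fun e => hik e.symm)]
  norm_num

lemma findA_0 {n : Int} {x y : List Int} (h : x.length ≤ y.length) (hT : TriP n x y) :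
    find n x y = 0 := by
  rw [find_eq, if_pos (pvItri_of_triP h hT)]

lemma findA_1 {n : Int} {x y : List Int} (h : x.length ≤ y.length) (hT : ¬ TriP n x y)
    (hP : PathP n x y) : find n x y = 1 := by
  rw [find_eq, if_neg (fun ht => hT (pvTriP_of_itri h ht))]
  apply le_antisymm
  · obtain ⟨v, b, c, hbc, hvb, hvc⟩ := hP
    obtain ⟨hv0, hvn, hb0, hbn, hne1, hp1⟩ := hvb
    obtain ⟨_, _, hc0, hcn, hne2, hp2⟩ := hvc
    have hle := pvIfold_le_triple n x y
      (i := b) (j := v) (k := c)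
      (PySem.List.mem_pyRange_one.mpr ⟨hb0, hbn⟩)
      (PySem.List.mem_pyRange_one.mpr ⟨hv0, hvn⟩)
      (PySem.List.mem_pyRange_one.mpr ⟨hc0, hcn⟩)
      (fun e => hne1 e.symm)
      (by push_neg; exact ⟨hbc, fun e => hne2 e.symm⟩) 3
    have e1 : ebI x y b v = 1 := ebI_of_hasPair h hb0 hv0 (hasPair_symm hp1)
    have e2 : ebI x y v c = 1 := ebI_of_hasPair h hv0 hc0 hp2
    have b3 := ebI_bounds h (a := c) (b := b) hc0 hb0
    unfold connI at hle
    omega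
  · apply pvIfold_ge n x y (by omega)
    intro i j k hi hj hk hij hnc
    have := pvConn_le_two_noTri h hT hi hj hk hij hnc
    omega

lemma findA_2 {n : Int} {x y : List Int} (h : x.length ≤ y.length) (hT : ¬ TriP n x y)
    (hP : ¬ PathP n x y) (hE : EdgeP n x y ∧ 3 ≤ n) : find n x y = 2 := by
  rw [find_eq, if_neg (fun ht => hT (pvTriP_of_itri h ht))]
  apply le_antisymm
  · obtain ⟨⟨a, b, hab⟩, hn3⟩ := hE
    obtain ⟨ha0, han, hb0, hbn, hne, hp⟩ := hab
    have ⟨k, hk0, hkn, hka, hkb⟩ : ∃ k : Int, 0 ≤ k ∧ k < n ∧ k ≠ a ∧ k ≠ b := by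
      by_cases h0 : a ≠ 0 ∧ b ≠ 0
      · exact ⟨0, by omega, by omega, fun e => h0.1 e.symm, fun e => h0.2 e.symm⟩
      · push_neg at h0
        by_cases h1 : a ≠ 1 ∧ b ≠ 1
        · exact ⟨1, by omega, by omega, fun e => h1.1 e.symm, fun e => h1.2 e.symm⟩
        · push_neg at h1
          refine ⟨2, by omega, by omega, ?_, ?_⟩
          · intro e
            by_cases ha : a = 0
            · omega
            · have hb := h0 ha
              have := h1 (by omega)
              omega
          · intro e
            by_cases ha : a = 0
            · have := h1 (by omega)
              omega
            · have hb := h0 ha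
              omega
    have hle := pvIfold_le_triple n x y (i := a) (j := b) (k := k)
      (PySem.List.mem_pyRange_one.mpr ⟨ha0, han⟩)
      (PySem.List.mem_pyRange_one.mpr ⟨hb0, hbn⟩)
      (PySem.List.mem_pyRange_one.mpr ⟨hk0, hkn⟩)
      hne (by push_neg; exact ⟨fun e => hka e.symm, hkb⟩) 3
    have e1 : ebI x y a b = 1 := ebI_of_hasPair h ha0 hb0 hp
    have b2 := ebI_bounds h (a := b) (b := k) hb0 hk0
    have b3 := ebI_bounds h (a := k) (b := a) hk0 ha0
    unfold connI at hle
    omega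
  · apply pvIfold_ge n x y (by omega)
    intro i j k hi hj hk hij hnc
    have := pvConn_le_two h hT hP hi hj hk hij hnc
    omega

lemma findA_3 {n : Int} {x y : List Int} (h : x.length ≤ y.length) (hT : ¬ TriP n x y)
    (hP : ¬ PathP n x y) (hE : ¬ (EdgeP n x y ∧ 3 ≤ n)) : find n x y = 3 := by
  rw [find_eq, if_neg (fun ht => hT (pvTriP_of_itri h ht))]
  apply le_antisymm
  · apply pvFoldl_le_init
    intro r i
    apply pvFoldl_le_init
    intro r' j
    split
    · exact le_refl _
    · apply pvFoldl_le_init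
      intro r'' k
      split
      · exact le_refl _
      · exact min_le_right _ _
  · apply pvIfold_ge n x y (le_refl _)
    intro i j k hi hj hk hij hnc
    rw [pvConn_eq_zero h hE hi hj hk hij hnc]
    norm_num

-- ---- B-side: adjacency-dict semantics ----
abbrev pvCnd (n : Int) (p : Int × Int) : Prop :=
  0 ≤ p.1 ∧ p.1 < n ∧ 0 ≤ p.2 ∧ p.2 < n ∧ p.1 ≠ p.2

abbrev pvAdj (n : Int) (x y : List Int) : PySem.Dict Int (PySem.Set Int) :=
  (x.zip y).foldl (pvAdjStep n) PySem.Dict.empty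

lemma pvAdjStep_mem (n : Int) (d : PySem.Dict Int (PySem.Set Int)) (p : Int × Int) (v w : Int) :
    w ∈ (pvAdjStep n d p).getD v PySem.Set.empty ↔
      w ∈ d.getD v PySem.Set.empty ∨
        (pvCnd n p ∧ ((p.1 = v ∧ p.2 = w) ∨ (p.1 = w ∧ p.2 = v))) := by
  by_cases hc : pvCnd n p
  · obtain ⟨h1, h2, h3, h4, h5⟩ := hc
    have hstep : pvAdjStep n d p =
        (d.insert p.1 (PySem.Set.add (d.getD p.1 PySem.Set.empty) p.2)).insert p.2
          (PySem.Set.add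
            ((d.insert p.1 (PySem.Set.add (d.getD p.1 PySem.Set.empty) p.2)).getD p.2
              PySem.Set.empty) p.1) := by
      unfold pvAdjStep; rw [if_pos ⟨h1, h2, h3, h4, h5⟩]
    rw [hstep, PySem.Dict.getD_insert]
    by_cases hv2 : v = p.2
    · subst hv2
      rw [if_pos rfl, PySem.Dict.getD_insert, if_neg (fun e => h5 e.symm), PySem.Set.mem_add]
      constructor
      · rintro (hw | rfl)
        · exact Or.inl hw
        · exact Or.inr ⟨⟨h1, h2, h3, h4, h5⟩, Or.inr ⟨rfl, rfl⟩⟩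
      · rintro (hw | ⟨_, ⟨e1, e2⟩ | ⟨e1, e2⟩⟩)
        · exact Or.inl hw
        · exact absurd e1 h5
        · exact Or.inr e1.symm
    · rw [if_neg hv2, PySem.Dict.getD_insert]
      by_cases hv1 : v = p.1
      · subst hv1
        rw [if_pos rfl, PySem.Set.mem_add]
        constructor
        · rintro (hw | rfl)
          · exact Or.inl hw
          · exact Or.inr ⟨⟨h1, h2, h3, h4, h5⟩, Or.inl ⟨rfl, rfl⟩⟩
        · rintro (hw | ⟨_, ⟨e1, e2⟩ | ⟨e1, e2⟩⟩)
          · exact Or.inl hw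
          · exact Or.inr e2.symm
          · exact absurd e2.symm hv2
      · rw [if_neg hv1]
        constructor
        · exact Or.inl
        · rintro (hw | ⟨_, ⟨e1, e2⟩ | ⟨e1, e2⟩⟩)
          · exact hw
          · exact absurd e1.symm hv1
          · exact absurd e2.symm hv2
  · have hstep : pvAdjStep n d p = d := by unfold pvAdjStep; rw [if_neg hc]
    rw [hstep]
    constructor
    · exact Or.inl
    · rintro (hw | ⟨hcnd, _⟩)
      · exact hw
      · exact absurd hcnd hc

lemma pvAdj_mem_gen (n : Int) : ∀ (l : List (Int × Int)) (d : PySem.Dict Int (PySem.Set Int))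
    (v w : Int), w ∈ (l.foldl (pvAdjStep n) d).getD v PySem.Set.empty ↔
      w ∈ d.getD v PySem.Set.empty ∨
        ∃ p ∈ l, pvCnd n p ∧ ((p.1 = v ∧ p.2 = w) ∨ (p.1 = w ∧ p.2 = v)) := by
  intro l
  induction l with
  | nil => intro d v w; simp
  | cons p l ih =>
    intro d v w
    rw [List.foldl_cons, ih, pvAdjStep_mem, List.exists_mem_cons_iff]
    exact or_assoc

lemma pvAdjStep_contains (n : Int) (d : PySem.Dict Int (PySem.Set Int)) (p : Int × Int) (v : Int) :
    (pvAdjStep n d p).contains v = true ↔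
      d.contains v = true ∨ (pvCnd n p ∧ (p.1 = v ∨ p.2 = v)) := by
  by_cases hc : pvCnd n p
  · obtain ⟨h1, h2, h3, h4, h5⟩ := hc
    have hstep : pvAdjStep n d p =
        (d.insert p.1 (PySem.Set.add (d.getD p.1 PySem.Set.empty) p.2)).insert p.2
          (PySem.Set.add
            ((d.insert p.1 (PySem.Set.add (d.getD p.1 PySem.Set.empty) p.2)).getD p.2
              PySem.Set.empty) p.1) := by
      unfold pvAdjStep; rw [if_pos ⟨h1, h2, h3, h4, h5⟩]
    rw [hstep, PySem.Dict.contains_insert, PySem.Dict.contains_insert]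
    simp only [Bool.or_eq_true, beq_iff_eq]
    constructor
    · rintro (e | e | hv)
      · exact Or.inr ⟨⟨h1, h2, h3, h4, h5⟩, Or.inr e.symm⟩
      · exact Or.inr ⟨⟨h1, h2, h3, h4, h5⟩, Or.inl e.symm⟩
      · exact Or.inl hv
    · rintro (hv | ⟨_, e | e⟩)
      · exact Or.inr (Or.inr hv)
      · exact Or.inr (Or.inl e.symm)
      · exact Or.inl e.symm
  · have hstep : pvAdjStep n d p = d := by unfold pvAdjStep; rw [if_neg hc]
    rw [hstep]
    constructor
    · exact Or.inl
    · rintro (hv | ⟨hcnd, _⟩)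
      · exact hv
      · exact absurd hcnd hc

lemma pvAdj_contains_gen (n : Int) : ∀ (l : List (Int × Int)) (d : PySem.Dict Int (PySem.Set Int))
    (v : Int), (l.foldl (pvAdjStep n) d).contains v = true ↔
      d.contains v = true ∨ ∃ p ∈ l, pvCnd n p ∧ (p.1 = v ∨ p.2 = v) := by
  intro l
  induction l with
  | nil => intro d v; simp
  | cons p l ih =>
    intro d v
    rw [List.foldl_cons, ih, pvAdjStep_contains, List.exists_mem_cons_iff]
    exact or_assoc

lemma pvAdj_nodup_keys_gen (n : Int) : ∀ (l : List (Int × Int)) (d : PySem.Dict Int (PySem.Set Int)),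
    d.keys.Nodup → (l.foldl (pvAdjStep n) d).keys.Nodup := by
  intro l
  induction l with
  | nil => intro d h; simpa using h
  | cons p l ih =>
    intro d h
    rw [List.foldl_cons]
    apply ih
    unfold pvAdjStep
    split
    · exact PySem.Dict.nodup_keys_insert _ _ _ (PySem.Dict.nodup_keys_insert _ _ _ h)
    · exact h

lemma pvAdjStep_val_nodup (n : Int) (d : PySem.Dict Int (PySem.Set Int)) (p : Int × Int)
    (h : ∀ u, (d.getD u PySem.Set.empty).Nodup) :
    ∀ u, ((pvAdjStep n d p).getD u PySem.Set.empty).Nodup := by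
  intro u
  unfold pvAdjStep
  split
  · rw [PySem.Dict.getD_insert]
    split
    · apply PySem.Set.nodup_add
      rw [PySem.Dict.getD_insert]
      split
      · exact PySem.Set.nodup_add _ _ (h _)
      · exact h _
    · rw [PySem.Dict.getD_insert]
      split
      · exact PySem.Set.nodup_add _ _ (h _)
      · exact h _
  · exact h u

lemma pvAdj_val_nodup_gen (n : Int) : ∀ (l : List (Int × Int)) (d : PySem.Dict Int (PySem.Set Int)),
    (∀ u, (d.getD u PySem.Set.empty).Nodup) →
    ∀ u, ((l.foldl (pvAdjStep n) d).getD u PySem.Set.empty).Nodup := by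
  intro l
  induction l with
  | nil => intro d h u; exact h u
  | cons p l ih =>
    intro d h u
    rw [List.foldl_cons]
    exact ih _ (pvAdjStep_val_nodup n d p h) u

-- specialised to the dict B actually builds
lemma pvMem_adj {n : Int} {x y : List Int} (v w : Int) :
    w ∈ (pvAdj n x y).getD v PySem.Set.empty ↔ AdjP n x y v w := by
  rw [pvAdj_mem_gen n (x.zip y) PySem.Dict.empty v w]
  rw [PySem.Dict.getD_empty]
  simp only [PySem.Set.empty, List.not_mem_nil, false_or]
  constructor
  · rintro ⟨p, hp, ⟨c1, c2, c3, c4, c5⟩, ⟨e1, e2⟩ | ⟨e1, e2⟩⟩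
    · exact ⟨by rw [← e1]; exact c1, by rw [← e1]; exact c2, by rw [← e2]; exact c3,
        by rw [← e2]; exact c4, by rw [← e1, ← e2]; exact c5, ⟨p, hp, Or.inl ⟨e1, e2⟩⟩⟩
    · exact ⟨by rw [← e2]; exact c3, by rw [← e2]; exact c4, by rw [← e1]; exact c1,
        by rw [← e1]; exact c2, by rw [← e2, ← e1]; exact fun e => c5 e.symm,
        ⟨p, hp, Or.inr ⟨e1, e2⟩⟩⟩
  · rintro ⟨hv0, hvn, hw0, hwn, hvw, p, hp, ⟨e1, e2⟩ | ⟨e1, e2⟩⟩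
    · exact ⟨p, hp, ⟨by rw [e1]; exact hv0, by rw [e1]; exact hvn, by rw [e2]; exact hw0,
        by rw [e2]; exact hwn, by rw [e1, e2]; exact hvw⟩, Or.inl ⟨e1, e2⟩⟩
    · exact ⟨p, hp, ⟨by rw [e1]; exact hw0, by rw [e1]; exact hwn, by rw [e2]; exact hv0,
        by rw [e2]; exact hvn, by rw [e1, e2]; exact fun e => hvw e.symm⟩, Or.inr ⟨e1, e2⟩⟩

lemma pvContains_adj {n : Int} {x y : List Int} (v : Int) :
    (pvAdj n x y).contains v = true ↔ ∃ w, AdjP n x y v w := by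
  rw [pvAdj_contains_gen n (x.zip y) PySem.Dict.empty v]
  rw [PySem.Dict.contains_empty]
  simp only [Bool.false_eq_true, false_or]
  constructor
  · rintro ⟨p, hp, ⟨c1, c2, c3, c4, c5⟩, e | e⟩
    · exact ⟨p.2, by rw [← e]; exact c1, by rw [← e]; exact c2, c3, c4,
        by rw [← e]; exact c5, ⟨p, hp, Or.inl ⟨e, rfl⟩⟩⟩
    · exact ⟨p.1, by rw [← e]; exact c3, by rw [← e]; exact c4, c1, c2,
        by rw [← e]; exact fun h => c5 h.symm, ⟨p, hp, Or.inr ⟨rfl, e⟩⟩⟩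
  · rintro ⟨w, hv0, hvn, hw0, hwn, hvw, p, hp, ⟨e1, e2⟩ | ⟨e1, e2⟩⟩
    · exact ⟨p, hp, ⟨by rw [e1]; exact hv0, by rw [e1]; exact hvn, by rw [e2]; exact hw0,
        by rw [e2]; exact hwn, by rw [e1, e2]; exact hvw⟩, Or.inl e1⟩
    · exact ⟨p, hp, ⟨by rw [e1]; exact hw0, by rw [e1]; exact hwn, by rw [e2]; exact hv0,
        by rw [e2]; exact hvn, by rw [e1, e2]; exact fun e => hvw e.symm⟩, Or.inr e2⟩

lemma pvAdj_nodup_keys (n : Int) (x y : List Int) : (pvAdj n x y).keys.Nodup :=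
  pvAdj_nodup_keys_gen n (x.zip y) PySem.Dict.empty PySem.Dict.nodup_keys_empty

lemma pvAdj_val_nodup (n : Int) (x y : List Int) (u : Int) :
    ((pvAdj n x y).getD u PySem.Set.empty).Nodup := by
  apply pvAdj_val_nodup_gen n (x.zip y) PySem.Dict.empty _ u
  intro u'
  rw [PySem.Dict.getD_empty]
  exact List.nodup_nil

lemma pvValuesAny {n : Int} {x y : List Int} (f : PySem.Set Int → Bool) :
    ((pvAdj n x y).values.any f = true) ↔
      ∃ v ∈ (pvAdj n x y).keys, f ((pvAdj n x y).getD v PySem.Set.empty) = true := by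
  rw [PySem.Dict.values_eq_map_keys _ (pvAdj_nodup_keys n x y) PySem.Set.empty, List.any_map]
  rw [List.any_eq_true]
  rfl

lemma pvTwo_le_length {s : List Int} (hs : s.Nodup) :
    2 ≤ s.length ↔ ∃ b ∈ s, ∃ c ∈ s, b ≠ c := by
  constructor
  · intro h
    match s, h with
    | a :: b :: t, _ =>
      refine ⟨a, List.mem_cons_self .., b, List.mem_cons_of_mem _ (List.mem_cons_self ..), ?_⟩
      intro e
      rw [List.nodup_cons] at hs
      exact hs.1 (e ▸ List.mem_cons_self ..)
  · rintro ⟨b, hb, c, hc, hbc⟩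
    match s with
    | [] => simp at hb
    | [a] =>
      simp at hb hc
      exact absurd (hb.trans hc.symm) hbc
    | a :: b' :: t => simp

lemma pvCond1 {n : Int} {x y : List Int} :
    ((pvAdj n x y).values.any (fun s =>
        s.any (fun b => ! PySem.Set.isdisjoint s ((pvAdj n x y).getD b PySem.Set.empty))) = true)
      ↔ TriP n x y := by
  rw [pvValuesAny]
  constructor
  · rintro ⟨v, hv, hs⟩
    rw [List.any_eq_true] at hs
    obtain ⟨b, hb, hdis⟩ := hs
    rw [Bool.not_eq_true'] at hdis
    have hnd : ¬ (∀ x' ∈ (pvAdj n x y).getD v PySem.Set.empty,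
        x' ∉ (pvAdj n x y).getD b PySem.Set.empty) := by
      intro hall
      rw [← PySem.Set.isdisjoint_iff] at hall
      rw [hall] at hdis
      exact Bool.true_eq_false ▸ (by simp at hdis)
    push_neg at hnd
    obtain ⟨c, hc1, hc2⟩ := hnd
    exact ⟨v, b, c, (pvMem_adj v b).mp hb, (pvMem_adj b c).mp hc2, (pvMem_adj v c).mp hc1⟩
  · rintro ⟨a, b, c, hab, hbc, hac⟩
    refine ⟨a, (PySem.Dict.contains_iff_mem_keys _ _).mp ((pvContains_adj a).mpr ⟨b, hab⟩), ?_⟩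
    rw [List.any_eq_true]
    refine ⟨b, (pvMem_adj a b).mpr hab, ?_⟩
    rw [Bool.not_eq_true']
    cases hd : PySem.Set.isdisjoint ((pvAdj n x y).getD a PySem.Set.empty)
      ((pvAdj n x y).getD b PySem.Set.empty) with
    | false => rfl
    | true =>
      exfalso
      exact (PySem.Set.isdisjoint_iff _ _).mp hd c ((pvMem_adj a c).mpr hac)
        ((pvMem_adj b c).mpr hbc)

lemma pvCond2 {n : Int} {x y : List Int} :
    ((pvAdj n x y).values.any (fun s => decide (2 ≤ PySem.Set.len s)) = true) ↔ PathP n x y := by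
  rw [pvValuesAny]
  constructor
  · rintro ⟨v, hv, hlen⟩
    rw [decide_eq_true_iff] at hlen
    have hlen' : 2 ≤ ((pvAdj n x y).getD v PySem.Set.empty).length := by
      unfold PySem.Set.len at hlen; exact_mod_cast hlen
    obtain ⟨b, hb, c, hc, hbc⟩ := (pvTwo_le_length (pvAdj_val_nodup n x y v)).mp hlen'
    exact ⟨v, b, c, hbc, (pvMem_adj v b).mp hb, (pvMem_adj v c).mp hc⟩
  · rintro ⟨v, b, c, hbc, hvb, hvc⟩
    refine ⟨v, (PySem.Dict.contains_iff_mem_keys _ _).mp ((pvContains_adj v).mpr ⟨b, hvb⟩), ?_⟩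
    rw [decide_eq_true_iff]
    have hlen' : 2 ≤ ((pvAdj n x y).getD v PySem.Set.empty).length :=
      (pvTwo_le_length (pvAdj_val_nodup n x y v)).mpr
        ⟨b, (pvMem_adj v b).mpr hvb, c, (pvMem_adj v c).mpr hvc, hbc⟩
    unfold PySem.Set.len
    exact_mod_cast hlen'

lemma pvCond3 {n : Int} {x y : List Int} : ((pvAdj n x y).size ≠ 0) ↔ EdgeP n x y := by
  have hkeys : (pvAdj n x y).keys.length = (pvAdj n x y).size := by
    simp [PySem.Dict.keys, PySem.Dict.size]
  constructor
  · intro hsz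
    have hne : (pvAdj n x y).keys ≠ [] := by
      intro he
      apply hsz
      rw [← hkeys, he]
      rfl
    obtain ⟨v, hv⟩ := List.exists_mem_of_ne_nil _ hne
    obtain ⟨w, hw⟩ := (pvContains_adj v).mp ((PySem.Dict.contains_iff_mem_keys _ _).mpr hv)
    exact ⟨v, w, hw⟩
  · rintro ⟨v, w, hvw⟩ hsz
    have hv := (PySem.Dict.contains_iff_mem_keys _ _).mp ((pvContains_adj v).mpr ⟨w, hvw⟩)
    have : (pvAdj n x y).keys.length = 0 := by rw [hkeys, hsz]
    rw [List.length_eq_zero_iff] at this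
    rw [this] at hv
    simp at hv

-- ---- B-side characterization ----
lemma pvTriP_n3' {n : Int} {x y : List Int} (hT : TriP n x y) : 3 ≤ n := by
  obtain ⟨a, b, c, ⟨ha0, han, hb0, hbn, hab, _⟩, ⟨_, _, hc0, hcn, hbc, _⟩, ⟨_, _, _, _, hac, _⟩⟩ := hT
  omega

lemma pvPathP_n3 {n : Int} {x y : List Int} (hP : PathP n x y) : 3 ≤ n := by
  obtain ⟨v, b, c, hbc, ⟨hv0, hvn, hb0, hbn, hvb, _⟩, ⟨_, _, hc0, hcn, hvc, _⟩⟩ := hP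
  omega

lemma find_alt_body (n : Int) (x y : List Int) (hn : ¬ n < 3) : find_alt n x y =
    (if ((pvAdj n x y).values.any (fun s =>
          s.any (fun b => ! PySem.Set.isdisjoint s ((pvAdj n x y).getD b PySem.Set.empty))))
      then (0 : Int)
      else if ((pvAdj n x y).values.any (fun s => decide (2 ≤ PySem.Set.len s))) then 1
      else if (pvAdj n x y).size ≠ 0 then 2 else 3) := by
  unfold find_alt
  rw [if_neg hn]

lemma findB_0 {n : Int} {x y : List Int} (hT : TriP n x y) : find_alt n x y = 0 := by
  rw [find_alt_body n x y (not_lt.mpr (pvTriP_n3' hT)), if_pos (pvCond1.mpr hT)]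

lemma findB_1 {n : Int} {x y : List Int} (hT : ¬ TriP n x y) (hP : PathP n x y) :
    find_alt n x y = 1 := by
  rw [find_alt_body n x y (not_lt.mpr (pvPathP_n3 hP)),
    if_neg (fun hc => hT (pvCond1.mp hc)), if_pos (pvCond2.mpr hP)]

lemma findB_2 {n : Int} {x y : List Int} (hT : ¬ TriP n x y) (hP : ¬ PathP n x y)
    (hE : EdgeP n x y ∧ 3 ≤ n) : find_alt n x y = 2 := by
  rw [find_alt_body n x y (not_lt.mpr hE.2),
    if_neg (fun hc => hT (pvCond1.mp hc)), if_neg (fun hc => hP (pvCond2.mp hc)),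
    if_pos (pvCond3.mpr hE.1)]

lemma findB_3 {n : Int} {x y : List Int} (hT : ¬ TriP n x y) (hP : ¬ PathP n x y)
    (hE : ¬ (EdgeP n x y ∧ 3 ≤ n)) : find_alt n x y = 3 := by
  by_cases hn : n < 3
  · unfold find_alt
    rw [if_pos hn]
  · rw [find_alt_body n x y hn,
      if_neg (fun hc => hT (pvCond1.mp hc)), if_neg (fun hc => hP (pvCond2.mp hc)),
      if_neg (fun hc => hE ⟨pvCond3.mp hc, by omega⟩)]

-- ===== VERDICT (by name: the statement is the Claim_ definition above) =====
theorem find_spec : Claim_equal_find := by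
  intro n x y _ hpre
  unfold Spec_find
  have h : x.length ≤ y.length := hpre
  by_cases hT : TriP n x y
  · rw [findA_0 h hT, findB_0 hT]
  · by_cases hP : PathP n x y
    · rw [findA_1 h hT hP, findB_1 hT hP]
    · by_cases hE : EdgeP n x y ∧ 3 ≤ n
      · rw [findA_2 h hT hP hE, findB_2 hT hP hE]
      · rw [findA_3 h hT hP hE, findB_3 hT hP hE]
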